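-- pv_equiv track=rewrite | github.com/dplocki/advent-of-code | 2016/2016_08.py | display_screen
-- ===== SOURCE A (Python) =====
-- def display_screen(screen: set, wide: int, tall: int) -> str:
--     return '\n'.join([
--         ''.join(
--             map(
--                 lambda is_present: '#' if is_present else ' ',
--                 [y * wide + x in screen for x in range(wide)]
--             )
--         )
--         for y in range(tall)
--     ])
-- ===== SOURCE B (Python) =====
-- def display_screen(screen: set, wide: int, tall: int) -> str:
--     grid = [[' '] * wide for _ in range(tall)]
--     for pos in screen:
--         if 0 <= pos and wide > 0 and pos < wide * tall:
--             row, col = divmod(pos, wide)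
--             grid[row][col] = '#'
--     return '\n'.join(''.join(row) for row in grid)
-- ===== Notes on version B (the rewrite author's own statement) =====
-- stated objective: alternative
-- what changed: B builds a tall x wide grid of spaces once and scatters each lit position from the set into it via divmod (ignoring out-of-range positions), instead of A's scan of every cell testing set membership; cell-writes are driven by the data rather than a per-cell membership test.
import Mathlib
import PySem

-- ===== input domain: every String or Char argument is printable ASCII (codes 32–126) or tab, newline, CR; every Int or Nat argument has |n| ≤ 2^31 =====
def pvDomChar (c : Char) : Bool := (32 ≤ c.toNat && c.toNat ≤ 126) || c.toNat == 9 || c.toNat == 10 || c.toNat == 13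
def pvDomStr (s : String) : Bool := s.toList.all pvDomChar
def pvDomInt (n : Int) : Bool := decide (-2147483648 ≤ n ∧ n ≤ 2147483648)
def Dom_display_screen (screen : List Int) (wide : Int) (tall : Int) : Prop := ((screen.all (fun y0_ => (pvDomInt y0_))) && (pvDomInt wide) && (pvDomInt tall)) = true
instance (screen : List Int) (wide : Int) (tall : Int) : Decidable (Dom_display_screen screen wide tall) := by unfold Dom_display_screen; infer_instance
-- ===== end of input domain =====

-- B scatters the lit pixels into a mutable grid instead of scanning every cell and
-- testing membership (alternative decomposition; same exact output).

-- ===== PORT A =====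
-- cell-by-cell scan: for each y, for each x, test membership of y*wide+x in the set
def display_screen (screen : List Int) (wide : Int) (tall : Int) : String :=
  PySem.Str.join "\n" ((PySem.List.pyRange 0 tall 1).map (fun y =>
    PySem.Str.join "" (((PySem.List.pyRange 0 wide 1).map
        (fun x => PySem.Set.contains screen (y * wide + x))).map
      (fun is_present => if is_present then "#" else " "))))

-- ===== PORT B =====
-- one scatter step = Python's `grid[row][col] = '#'` under the bounds guard; the
-- guard makes row/col nonnegative and in range, so `.toNat` indexing is exact here
def pvScatter (wide : Int) (tall : Int) (g : List (List Char)) (pos : Int) : List (List Char) :=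
  if 0 ≤ pos ∧ 0 < wide ∧ pos < wide * tall then
    let row := (PySem.Int.floordiv pos wide).toNat
    let col := (PySem.Int.mod pos wide).toNat
    g.set row ((g.getD row []).set col '#')
  else g

def display_screen_alt (screen : List Int) (wide : Int) (tall : Int) : String :=
  let grid := screen.foldl (pvScatter wide tall)
    (List.replicate tall.toNat (List.replicate wide.toNat ' '))
  PySem.Str.join "\n" (grid.map (fun row => String.ofList row))

-- ===== PRECONDITION & SPEC =====
def Spec_display_screen (screen : List Int) (wide : Int) (tall : Int) (out : String) : Prop := out = display_screen_alt screen wide tall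
instance (screen : List Int) (wide : Int) (tall : Int) (out : String) : Decidable (Spec_display_screen screen wide tall out) := by unfold Spec_display_screen; infer_instance

-- ===== CLAIM (what is proved, stated in full; the proofs are below) =====
def Claim_equal_display_screen : Prop := ∀ (screen : List Int) (wide : Int) (tall : Int), Dom_display_screen screen wide tall → Spec_display_screen screen wide tall (display_screen screen wide tall)

-- ===== LEMMAS AND PROOFS =====

-- the grid both programs describe, cell by cell
def pvTarget (screen : List Int) (wide : Int) (tall : Int) : List (List Char) :=
  (List.range tall.toNat).map (fun (y : Nat) =>
    (List.range wide.toNat).map (fun (x : Nat) =>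
      if screen.contains ((y : Int) * wide + (x : Int)) then '#' else ' '))

def pvShape (wide tall : Int) (g : List (List Char)) : Prop :=
  g.length = tall.toNat ∧ ∀ r ∈ g, r.length = wide.toNat

lemma pvScatter_shape (wide tall : Int) (g : List (List Char)) (pos : Int)
    (h : pvShape wide tall g) : pvShape wide tall (pvScatter wide tall g pos) := by
  obtain ⟨h1, h2⟩ := h
  unfold pvScatter
  split
  · by_cases hlt : (PySem.Int.floordiv pos wide).toNat < g.length
    · refine ⟨by simpa using h1, ?_⟩
      intro r hr
      rcases List.mem_or_eq_of_mem_set hr with hr | hr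
      · exact h2 r hr
      · subst hr
        rw [List.length_set]
        exact h2 _ (by rw [List.getD_eq_getElem _ _ hlt]; exact List.getElem_mem _)
    · rw [List.set_eq_of_length_le (by omega)]
      exact ⟨h1, h2⟩
  · exact ⟨h1, h2⟩

lemma pvFold_shape (wide tall : Int) (l : List Int) (g : List (List Char))
    (h : pvShape wide tall g) : pvShape wide tall (l.foldl (pvScatter wide tall) g) := by
  induction l generalizing g with
  | nil => exact h
  | cons p l ih => exact ih _ (pvScatter_shape wide tall g p h)

-- one scatter step, seen cell by cell
lemma pvScatter_getD (wide tall : Int) (g : List (List Char)) (pos : Int) (y x : Nat)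
    (hy : y < tall.toNat) (hx : x < wide.toNat) (hs : pvShape wide tall g) :
    ((pvScatter wide tall g pos).getD y []).getD x ' ' =
      if pos = (y : Int) * wide + (x : Int) then '#' else (g.getD y []).getD x ' ' := by
  obtain ⟨h1, h2⟩ := hs
  have hw : 0 < wide := by omega
  have ht : 0 < tall := by omega
  have hxw : (x : Int) < wide := by omega
  have hyt : (y : Int) + 1 ≤ tall := by omega
  have hv0 : 0 ≤ (y : Int) * wide + (x : Int) := by
    have := mul_nonneg (Int.natCast_nonneg y) (le_of_lt hw)
    omega
  have hvlt : (y : Int) * wide + (x : Int) < wide * tall := by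
    have h3 : ((y : Int) + 1) * wide ≤ tall * wide :=
      mul_le_mul_of_nonneg_right hyt (le_of_lt hw)
    have h4 : (y : Int) * wide + (x : Int) < ((y : Int) + 1) * wide := by ring_nf; omega
    have h5 : tall * wide = wide * tall := mul_comm _ _
    omega
  have hylen : y < g.length := by omega
  have hrowlen : (g.getD y []).length = wide.toNat :=
    h2 _ (by rw [List.getD_eq_getElem _ _ hylen]; exact List.getElem_mem _)
  unfold pvScatter
  by_cases hguard : 0 ≤ pos ∧ 0 < wide ∧ pos < wide * tall
  · rw [if_pos hguard]
    have hfd : PySem.Int.floordiv pos wide = pos / wide := by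
      show Int.fdiv pos wide = pos / wide
      rw [Int.fdiv_eq_ediv, if_pos (Or.inl (le_of_lt hw))]; ring
    have hfm : PySem.Int.mod pos wide = pos % wide := by
      show Int.fmod pos wide = pos % wide
      rw [Int.fmod_eq_emod, if_pos (Or.inl (le_of_lt hw))]; ring
    have hc0 : 0 ≤ pos % wide := Int.emod_nonneg pos (ne_of_gt hw)
    have hclt : pos % wide < wide := Int.emod_lt_of_pos pos hw
    have hr0 : 0 ≤ pos / wide := Int.ediv_nonneg hguard.1 (le_of_lt hw)
    have hid : wide * (pos / wide) + pos % wide = pos := Int.mul_ediv_add_emod pos wide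
    rw [hfd, hfm]
    by_cases hpv : pos = (y : Int) * wide + (x : Int)
    · rw [if_pos hpv]
      have hdiv : pos / wide = (y : Int) := by
        rw [hpv]
        have e1 : (y : Int) * wide + (x : Int) = (x : Int) + (y : Int) * wide := by ring
        rw [e1, Int.add_mul_ediv_right _ _ (ne_of_gt hw),
          Int.ediv_eq_zero_of_lt (Int.natCast_nonneg x) hxw]
        ring
      have hmod : pos % wide = (x : Int) := by
        rw [hpv]
        have e1 : (y : Int) * wide + (x : Int) = (x : Int) + wide * (y : Int) := by ring
        rw [e1, Int.add_mul_emod_self_left]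
        exact Int.emod_eq_of_lt (Int.natCast_nonneg x) hxw
      rw [hdiv, hmod]
      simp only [Int.toNat_natCast]
      have hsetlen : y < (g.set y ((g.getD y []).set x '#')).length := by
        rw [List.length_set]; omega
      rw [List.getD_eq_getElem _ _ hsetlen, List.getElem_set_self]
      rw [List.getD_eq_getElem _ _ (by rw [List.length_set]; omega)]
      rw [List.getElem_set_self]
    · rw [if_neg hpv]
      by_cases hry : pos / wide = (y : Int)
      · -- same row, different column
        have hcx : pos % wide ≠ (x : Int) := by
          intro hcx
          apply hpv
          rw [← hid, hry, hcx]; ring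
        rw [hry]
        simp only [Int.toNat_natCast]
        have hsetlen : y < (g.set y ((g.getD y []).set (pos % wide).toNat '#')).length := by
          rw [List.length_set]; omega
        rw [List.getD_eq_getElem _ _ hsetlen, List.getElem_set_self]
        have hcxn : (pos % wide).toNat ≠ x := by omega
        rw [List.getD_eq_getElem?_getD (l := (g.getD y []).set (pos % wide).toNat '#'),
          List.getElem?_set_ne hcxn, ← List.getD_eq_getElem?_getD]
      · -- different row
        have hryn : (pos / wide).toNat ≠ y := by omega
        rw [List.getD_eq_getElem?_getD (l := g.set _ _), List.getElem?_set_ne hryn,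
          ← List.getD_eq_getElem?_getD]
  · rw [if_neg hguard]
    rw [if_neg (by rintro rfl; exact hguard ⟨hv0, hw, hvlt⟩)]

lemma pvFold_getD (wide tall : Int) (l : List Int) (g : List (List Char)) (y x : Nat)
    (hy : y < tall.toNat) (hx : x < wide.toNat) (hs : pvShape wide tall g) :
    ((l.foldl (pvScatter wide tall) g).getD y []).getD x ' ' =
      if l.contains ((y : Int) * wide + (x : Int)) then '#' else (g.getD y []).getD x ' ' := by
  induction l generalizing g with
  | nil => simp
  | cons p l ih =>
    rw [List.foldl_cons, ih _ (pvScatter_shape wide tall g p hs),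
      pvScatter_getD wide tall g p y x hy hx hs]
    by_cases hp : p = (y : Int) * wide + (x : Int)
    · simp [hp]
    · have hps : ¬ ((y : Int) * wide + (x : Int) = p) := fun h => hp (Eq.symm h)
      simp [hp, hps]

lemma pvGrid_eq (screen : List Int) (wide tall : Int) :
    screen.foldl (pvScatter wide tall)
      (List.replicate tall.toNat (List.replicate wide.toNat ' ')) =
    pvTarget screen wide tall := by
  have hs0 : pvShape wide tall (List.replicate tall.toNat (List.replicate wide.toNat ' ')) := by
    constructor
    · simp
    · intro r hr
      rw [List.eq_of_mem_replicate hr]; simp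
  have hshape := pvFold_shape wide tall screen _ hs0
  apply List.ext_getElem
  · rw [hshape.1]; simp [pvTarget]
  · intro y hy1 hy2
    have hytall : y < tall.toNat := by rw [hshape.1] at hy1; exact hy1
    apply List.ext_getElem
    · rw [hshape.2 _ (List.getElem_mem _)]
      simp [pvTarget]
    · intro x hx1 hx2
      have hxwide : x < wide.toNat := by
        rw [hshape.2 _ (List.getElem_mem _)] at hx1; exact hx1
      have hcell := pvFold_getD wide tall screen _ y x hytall hxwide hs0
      rw [List.getD_eq_getElem _ _ hy1, List.getD_eq_getElem _ _ hx1] at hcell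
      rw [hcell]
      have hinit : ((List.replicate tall.toNat (List.replicate wide.toNat ' ')).getD y []).getD x ' ' = ' ' := by
        have h1 : y < (List.replicate tall.toNat (List.replicate wide.toNat ' ')).length := by
          simpa using hytall
        rw [List.getD_eq_getElem _ _ h1, List.getElem_replicate]
        have h2 : x < (List.replicate wide.toNat ' ').length := by simpa using hxwide
        rw [List.getD_eq_getElem _ _ h2, List.getElem_replicate]
      rw [hinit]
      have h3 : (pvTarget screen wide tall)[y][x]? = some (if screen.contains ((y : Int) * wide + (x : Int)) then '#' else ' ') := by
        have h1 : (pvTarget screen wide tall)[y]? = some ((List.range wide.toNat).map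
            (fun (x : Nat) => if screen.contains ((y : Int) * wide + (x : Int)) then '#' else ' ')) := by
          unfold pvTarget
          rw [List.getElem?_map, List.getElem?_range hytall, Option.map_some]
        have h2 : (pvTarget screen wide tall)[y] = (List.range wide.toNat).map
            (fun (x : Nat) => if screen.contains ((y : Int) * wide + (x : Int)) then '#' else ' ') := by
          have h5 := List.getElem?_eq_getElem hy2
          rw [h1] at h5
          exact (Option.some_inj.mp h5).symm
        rw [h2, List.getElem?_map, List.getElem?_range hxwide, Option.map_some]
      have h4 := List.getElem?_eq_getElem hx2
      rw [h3] at h4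
      exact Option.some_inj.mp h4

lemma pvRow_eq (screen : List Int) (wide : Int) (y : Int) :
    PySem.Str.join "" (((PySem.List.pyRange 0 wide 1).map
        (fun x => PySem.Set.contains screen (y * wide + x))).map
      (fun is_present => if is_present then "#" else " ")) =
    String.ofList ((List.range wide.toNat).map (fun (x : Nat) =>
      if screen.contains (y * wide + (x : Int)) then '#' else ' ')) := by
  rw [PySem.List.pyRange_one]
  simp only [Int.sub_zero, List.map_map, PySem.Str.join]
  have he : "".toList = ([] : List Char) := rfl
  rw [he]
  congr 1
  rw [← PySem.Chars.join_nil_singletons ((List.range wide.toNat).map (fun (x : Nat) =>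
      if screen.contains (y * wide + (x : Int)) then '#' else ' ')), List.map_map]
  congr 1
  apply List.map_congr_left
  intro k hk
  simp only [Function.comp_apply, zero_add]
  by_cases h : y * wide + (k : Int) ∈ screen <;> simp [PySem.Set.contains, h]

-- ===== VERDICT (by name: the statement is the Claim_ definition above) =====
theorem display_screen_spec : Claim_equal_display_screen := by
  intro screen wide tall _
  show display_screen screen wide tall = display_screen_alt screen wide tall
  unfold display_screen display_screen_alt
  rw [pvGrid_eq]
  congr 1
  rw [PySem.List.pyRange_one (a := 0) (b := tall)]
  simp only [Int.sub_zero, List.map_map, pvTarget]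
  apply List.map_congr_left
  intro k hk
  simp only [Function.comp_apply, zero_add]
  rw [← List.map_map]
  exact pvRow_eq screen wide (k : Int)
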